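-- pv_equiv track=rewrite | github.com/zfifteen/unified-framework | tests/test-finding/ml-cross-validation/scripts/prepare_datasets.py | _lempel_ziv_complexity
-- ===== SOURCE A (Python) =====
-- def _lempel_ziv_complexity(sequence):
--     """
--     Compute Lempel-Ziv complexity of a sequence
--     """
--     if len(sequence) < 2:
--         return 1
--
--     n = len(sequence)
--     complexity = 1
--     i = 0
--
--     while i < n - 1:
--         j = i + 1
--         while j <= n:
--             substring = sequence[i:j]
--             if substring not in sequence[:i]:
--                 complexity += 1
--                 i = j - 1
--                 break
--             j += 1
--         else:
--             break
--         i += 1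
--
--     return complexity
-- ===== SOURCE B (Python) =====
-- def _lempel_ziv_complexity(sequence):
--     """
--     Compute Lempel-Ziv complexity of a sequence.
--     At each parse position, instead of growing the candidate one character at
--     a time, binary-search the longest match length against the prefix
--     (containment is monotone in the length), then jump past it.
--     """
--     if len(sequence) < 2:
--         return 1
--
--     n = len(sequence)
--     complexity = 1
--     i = 0
--
--     while i < n - 1:
--         # largest m with sequence[i:i+m] occurring inside sequence[:i]
--         lo, hi = 0, min(i, n - i)
--         while lo < hi:
--             mid = (lo + hi + 1) // 2
--             if sequence[i:i+mid] in sequence[:i]: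
--                 lo = mid
--             else:
--                 hi = mid - 1
--         if i + lo >= n:
--             break
--         complexity += 1
--         i += lo + 1
--
--     return complexity
-- ===== Notes on version B (the rewrite author's own statement) =====
-- stated objective: alternative
-- what changed: A grows each candidate phrase one character at a time, re-testing substring containment for every length; B binary-searches the longest match length per phrase (containment in the prefix is monotone in the length) and jumps past it in one step.
import Mathlib
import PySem

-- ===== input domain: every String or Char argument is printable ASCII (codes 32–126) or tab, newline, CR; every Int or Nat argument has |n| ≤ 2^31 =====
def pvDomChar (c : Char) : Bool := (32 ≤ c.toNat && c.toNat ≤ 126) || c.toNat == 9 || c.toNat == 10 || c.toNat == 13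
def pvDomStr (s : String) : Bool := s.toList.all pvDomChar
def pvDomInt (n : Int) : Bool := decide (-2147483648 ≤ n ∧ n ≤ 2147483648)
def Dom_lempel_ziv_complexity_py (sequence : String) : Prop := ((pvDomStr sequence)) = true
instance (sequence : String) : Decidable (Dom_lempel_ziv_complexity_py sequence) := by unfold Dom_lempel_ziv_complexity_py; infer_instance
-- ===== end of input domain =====

-- B replaces A's character-by-character phrase growth by a binary search on the
-- longest match length per phrase (alternative algorithm; equal return values).

-- ===== PORT A =====
-- inner `while j <= n:` loop of A: returns `some j` where the `break` fires
-- (substring not in prefix), `none` for the `else:` (normal exhaustion) branch;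
-- `sequence[i:j]` = slice l i j, `sequence[:i]` = slice l none i, `not in` = isIn … = false
def lzA_inner (l : List Char) (n i j : Nat) : Option Nat :=
  if _h : j ≤ n then
    if PySem.Chars.isIn (PySem.List.slice l (some (i : Int)) (some (j : Int)))
        (PySem.List.slice l none (some (i : Int))) = false then
      some j
    else lzA_inner l n i (j + 1)
  else none
termination_by n + 1 - j

-- needed by lzA_loop's termination proof: the returned j is ≥ the starting j
theorem lzA_inner_le (l : List Char) (n i : Nat) :
    ∀ j k, lzA_inner l n i j = some k → j ≤ k ∧ k ≤ n := by
  intro j k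
  induction hd : n + 1 - j using Nat.strongRecOn generalizing j with
  | _ d ih =>
    intro h
    rw [lzA_inner] at h
    split at h
    · split at h
      · rename_i hj _
        simp at h
        omega
      · rename_i hj _
        have := ih (n + 1 - (j + 1)) (by omega) (j + 1) rfl h
        omega
    · simp at h

-- outer `while i < n - 1:` loop of A
def lzA_loop (l : List Char) (n : Nat) (complexity : Int) (i : Nat) : Int :=
  if _h : i < n - 1 then
    match hm : lzA_inner l n i (i + 1) with
    | some j => lzA_loop l n (complexity + 1) (j - 1 + 1)  -- i = j - 1; i += 1
    | none => complexity
  else complexity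
termination_by n - i
decreasing_by
  have := lzA_inner_le l n i (i + 1) j hm
  omega

def lempel_ziv_complexity_py (sequence : String) : Int :=
  if PySem.Str.len sequence < 2 then 1
  else lzA_loop sequence.toList sequence.toList.length 1 0

-- ===== PORT B =====
-- `while lo < hi:` binary search of B; mid = (lo+hi+1)//2 is Nat division on
-- these nonnegative values; `sequence[i:i+mid] in sequence[:i]` = isIn … = true
def lzB_bsearch (l : List Char) (i lo hi : Nat) : Nat :=
  if _h : lo < hi then
    if PySem.Chars.isIn
        (PySem.List.slice l (some (i : Int)) (some ((i : Int) + (((lo + hi + 1) / 2 : Nat) : Int))))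
        (PySem.List.slice l none (some (i : Int))) then
      lzB_bsearch l i ((lo + hi + 1) / 2) hi
    else
      lzB_bsearch l i lo ((lo + hi + 1) / 2 - 1)
  else lo
termination_by hi - lo
decreasing_by all_goals omega

-- outer `while i < n - 1:` loop of B
def lzB_loop (l : List Char) (n : Nat) (complexity : Int) (i : Nat) : Int :=
  if _h : i < n - 1 then
    if n ≤ i + lzB_bsearch l i 0 (min i (n - i)) then complexity
    else lzB_loop l n (complexity + 1) (i + lzB_bsearch l i 0 (min i (n - i)) + 1)
  else complexity
termination_by n - i
decreasing_by omega

def lempel_ziv_complexity_py_alt (sequence : String) : Int :=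
  if PySem.Str.len sequence < 2 then 1
  else lzB_loop sequence.toList sequence.toList.length 1 0

-- ===== PRECONDITION & SPEC =====
def Spec_lempel_ziv_complexity_py (sequence : String) (out : Int) : Prop := out = lempel_ziv_complexity_py_alt sequence
instance (sequence : String) (out : Int) : Decidable (Spec_lempel_ziv_complexity_py sequence out) := by unfold Spec_lempel_ziv_complexity_py; infer_instance

-- ===== CLAIM (what is proved, stated in full; the proofs are below) =====
def Claim_equal_lempel_ziv_complexity_py : Prop := ∀ (sequence : String), Dom_lempel_ziv_complexity_py sequence → Spec_lempel_ziv_complexity_py sequence (lempel_ziv_complexity_py sequence)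

-- ===== LEMMAS AND PROOFS =====

-- `Occ l i m`: the length-m substring starting at i occurs inside the prefix l[:i]
def Occ (l : List Char) (i m : Nat) : Prop := ((l.drop i).take m) <:+: (l.take i)

-- containment is monotone in the length
theorem Occ_mono (l : List Char) (i : Nat) {m m' : Nat} (h : Occ l i m) (hm : m' ≤ m) :
    Occ l i m' := by
  have h1 : (l.drop i).take m' = ((l.drop i).take m).take m' := by
    rw [List.take_take, Nat.min_eq_left hm]
  have h2 : (l.drop i).take m' <+: (l.drop i).take m := by
    rw [h1]; exact List.take_prefix _ _
  exact h2.isInfix.trans h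

-- a match longer than the prefix cannot occur in it
theorem Occ_le (l : List Char) {i m : Nat} (hm : i + m ≤ l.length)
    (h : Occ l i m) : m ≤ i := by
  have hlen := h.length_le
  simp [List.length_take, List.length_drop] at hlen
  omega

-- binary-search postcondition: result r satisfies Occ r and no m in (r, n-i] occurs
theorem lzB_bsearch_spec (l : List Char) (n i : Nat) :
    ∀ lo hi, lo ≤ hi → Occ l i lo → (∀ m, hi < m → m ≤ n - i → ¬ Occ l i m) →
      Occ l i (lzB_bsearch l i lo hi) ∧
      (∀ m, lzB_bsearch l i lo hi < m → m ≤ n - i → ¬ Occ l i m) ∧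
      lzB_bsearch l i lo hi ≤ hi := by
  intro lo hi
  induction hd : hi - lo using Nat.strongRecOn generalizing lo hi with
  | _ d ih =>
    intro hle hlo hhi
    rw [lzB_bsearch]
    split
    · rename_i hlt
      have hmid1 : lo + 1 ≤ (lo + hi + 1) / 2 := by omega
      have hmid2 : (lo + hi + 1) / 2 ≤ hi := by omega
      rw [PySem.List.slice_natCast_add, PySem.List.slice_to_natCast]
      split
      · rename_i hin
        rw [PySem.Chars.isIn_iff_infix] at hin
        have := ih (hi - (lo + hi + 1) / 2) (by omega) ((lo + hi + 1) / 2) hi rfl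
          (by omega) hin hhi
        exact ⟨this.1, this.2.1, this.2.2⟩
      · rename_i hin
        have hno : ¬ Occ l i ((lo + hi + 1) / 2) := by
          intro hc
          exact hin ((PySem.Chars.isIn_iff_infix _ _).mpr hc)
        have := ih ((lo + hi + 1) / 2 - 1 - lo) (by omega) lo ((lo + hi + 1) / 2 - 1) rfl
          (by omega) hlo (fun m hm _ hc => hno (Occ_mono l i hc (by omega)))
        exact ⟨this.1, this.2.1, by omega⟩
    · rename_i hge
      have : lo = hi := by omega
      subst this
      exact ⟨hlo, hhi, le_refl _⟩

-- A's inner loop stops exactly at the first length past the binary-search result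
theorem lzA_inner_some (l : List Char) (n i best : Nat) (hocc : Occ l i best)
    (hno : ∀ m, best < m → m ≤ n - i → ¬ Occ l i m) (hend : i + best + 1 ≤ n) :
    ∀ j, i < j → j ≤ i + best + 1 → lzA_inner l n i j = some (i + best + 1) := by
  intro j
  induction hd : (i + best + 1) - j using Nat.strongRecOn generalizing j with
  | _ d ih =>
    intro hij hj
    rw [lzA_inner]
    have hjn : j ≤ n := by omega
    simp only [hjn, dif_pos]
    rw [PySem.List.slice_natCast, PySem.List.slice_to_natCast]
    split
    · rename_i hfalse
      rw [PySem.Chars.isIn_eq_false_iff] at hfalse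
      by_cases hjb : j = i + best + 1
      · simp [hjb]
      · exact absurd (Occ_mono l i hocc (show j - i ≤ best by omega)) hfalse
    · rename_i htrue
      by_cases hjb : j = i + best + 1
      · exfalso
        rw [Bool.not_eq_false, PySem.Chars.isIn_iff_infix] at htrue
        exact hno (j - i) (by omega) (by omega) htrue
      · exact ih ((i + best + 1) - (j + 1)) (by omega) (j + 1) rfl (by omega) (by omega)

-- when every remaining length occurs in the prefix, A's inner loop exhausts (`else: break`)
theorem lzA_inner_none (l : List Char) (n i best : Nat) (hocc : Occ l i best)
    (hbest : best = n - i) :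
    ∀ j, i < j → lzA_inner l n i j = none := by
  intro j
  induction hd : (n + 1) - j using Nat.strongRecOn generalizing j with
  | _ d ih =>
    intro hij
    rw [lzA_inner]
    split
    · rename_i hjn
      rw [PySem.List.slice_natCast, PySem.List.slice_to_natCast]
      have hOc : Occ l i (j - i) := Occ_mono l i hocc (by omega)
      split
      · rename_i hfalse
        rw [PySem.Chars.isIn_eq_false_iff] at hfalse
        exact absurd hOc hfalse
      · exact ih ((n + 1) - (j + 1)) (by omega) (j + 1) rfl (by omega)
    · rfl

-- the two outer loops agree step by step
theorem loop_eq (l : List Char) (n : Nat) (hn : n = l.length) :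
    ∀ i complexity, lzA_loop l n complexity i = lzB_loop l n complexity i := by
  intro i
  induction hd : n - i using Nat.strongRecOn generalizing i with
  | _ d ih =>
    intro complexity
    rw [lzA_loop, lzB_loop]
    by_cases hi : i < n - 1
    · simp only [hi, dif_pos]
      have hocc0 : Occ l i 0 := by simp [Occ]
      have hinit : ∀ m, min i (n - i) < m → m ≤ n - i → ¬ Occ l i m := by
        intro m hm hm2 hc
        have : m ≤ i := Occ_le l (by omega) hc
        omega
      obtain ⟨hO, hN, hle⟩ :=
        lzB_bsearch_spec l n i 0 (min i (n - i)) (by omega) hocc0 hinit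
      by_cases hbr : n ≤ i + lzB_bsearch l i 0 (min i (n - i))
      · have hbeq : lzB_bsearch l i 0 (min i (n - i)) = n - i := by omega
        rw [lzA_inner_none l n i _ hO hbeq (i + 1) (by omega)]
        simp [hbr]
      · rw [lzA_inner_some l n i _ hO hN (by omega) (i + 1) (by omega) (by omega)]
        simp only [if_neg hbr]
        have he : i + lzB_bsearch l i 0 (min i (n - i)) + 1 - 1 + 1
            = i + lzB_bsearch l i 0 (min i (n - i)) + 1 := by omega
        rw [he]
        exact ih (n - (i + lzB_bsearch l i 0 (min i (n - i)) + 1)) (by omega) _ rfl _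
    · simp [hi]

-- ===== VERDICT (by name: the statement is the Claim_ definition above) =====
theorem lempel_ziv_complexity_py_spec : Claim_equal_lempel_ziv_complexity_py := by
  intro sequence _
  unfold Spec_lempel_ziv_complexity_py lempel_ziv_complexity_py lempel_ziv_complexity_py_alt
  split
  · rfl
  · exact loop_eq sequence.toList sequence.toList.length rfl 0 1
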